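-- pv_equiv track=rewrite | github.com/Ssnati/Process-Scheduling-Algorithms | Algorithms/FCFS.py | calcular_tiempo_espera
-- ===== SOURCE A (Python) =====
-- def calcular_tiempo_espera(tiempos_llegada, tiempos_ejecucion):
--     n = len(tiempos_llegada)
--     tiempos_espera = [0] * n
--     tiempos_completados = [0] * n
--
--     # El primer proceso no espera
--     tiempos_completados[0] = tiempos_llegada[0] + tiempos_ejecucion[0]
--
--     for i in range(1, n):
--         # El tiempo de completado del proceso anterior + el tiempo de ejecución del proceso actual
--         tiempos_completados[i] = max(tiempos_completados[i - 1], tiempos_llegada[i]) + tiempos_ejecucion[i]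
--         tiempos_espera[i] = tiempos_completados[i] - tiempos_llegada[i] - tiempos_ejecucion[i]
--
--     return tiempos_espera
-- ===== SOURCE B (Python) =====
-- def calcular_tiempo_espera(tiempos_llegada, tiempos_ejecucion):
--     # Closed-form decomposition: completion[i] = P[i] + M[i], where
--     # P[i] = exec[0]+...+exec[i] (prefix work) and
--     # M[i] = max_{j<=i} (arrival[j] - P[j-1]) (largest idle offset so far),
--     # so wait[i] = max(completion[i-1] - arrival[i], 0).
--     n = len(tiempos_llegada)
--     # Stage 1: prefix sums of execution times.
--     prefijos = []
--     s = 0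
--     for i in range(n):
--         s += tiempos_ejecucion[i]
--         prefijos.append(s)
--     # Stage 2: running maxima of arrival[i] - P[i-1].
--     maximos = []
--     m = tiempos_llegada[0]
--     for i in range(n):
--         m = max(m, tiempos_llegada[i] - (prefijos[i - 1] if i > 0 else 0))
--         maximos.append(m)
--     # Stage 3: closed-form waiting times.
--     return [0] + [max(prefijos[i - 1] + maximos[i - 1] - tiempos_llegada[i], 0)
--                   for i in range(1, n)]
-- ===== Notes on version B (the rewrite author's own statement) =====
-- stated objective: alternative
-- what changed: B abandons the completion-time recurrence entirely: it computes waiting times by a closed-form prefix decomposition completion[i] = P[i] + M[i] (P = prefix sums of execution times, M = running maximum of arrival[j] - P[j-1]) in three staged passes, instead of A's single loop threading a full completion-time array.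
import Mathlib
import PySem

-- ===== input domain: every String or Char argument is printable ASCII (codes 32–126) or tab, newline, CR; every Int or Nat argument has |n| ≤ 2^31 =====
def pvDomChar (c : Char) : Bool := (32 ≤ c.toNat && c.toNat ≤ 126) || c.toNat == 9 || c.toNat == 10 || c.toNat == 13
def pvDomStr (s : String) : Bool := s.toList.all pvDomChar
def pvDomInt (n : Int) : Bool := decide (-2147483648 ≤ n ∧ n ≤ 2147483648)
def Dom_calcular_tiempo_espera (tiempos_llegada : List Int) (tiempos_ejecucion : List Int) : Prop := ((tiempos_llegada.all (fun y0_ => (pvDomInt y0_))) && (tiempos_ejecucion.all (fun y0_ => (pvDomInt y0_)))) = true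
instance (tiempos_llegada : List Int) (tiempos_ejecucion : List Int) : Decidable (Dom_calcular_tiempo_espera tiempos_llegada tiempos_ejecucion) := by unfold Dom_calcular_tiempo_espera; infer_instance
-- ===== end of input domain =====

-- B replaces A's completion-time recurrence by a closed-form prefix decomposition
-- completion[i] = P[i] + M[i] (prefix sums of execution times plus a running maximum
-- of arrival[j] - P[j-1]) computed in three staged passes (objective: alternative).

-- ===== PORT A =====
def calcular_tiempo_espera (tiempos_llegada : List Int) (tiempos_ejecucion : List Int) : List Int :=
  let n : Int := (tiempos_llegada.length : Int)
  let tiempos_espera : List Int := List.replicate tiempos_llegada.length 0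
  let tiempos_completados : List Int := List.replicate tiempos_llegada.length 0
  -- tiempos_completados[0] = tiempos_llegada[0] + tiempos_ejecucion[0]  (IndexError on empty input: outside Pre_)
  let tiempos_completados := tiempos_completados.set 0
    (PySem.List.pyGetD tiempos_llegada 0 0 + PySem.List.pyGetD tiempos_ejecucion 0 0)
  let st := (PySem.List.pyRange 1 n 1).foldl
    (fun (st : List Int × List Int) (i : Int) =>
      let c := max (PySem.List.pyGetD st.2 (i - 1) 0) (PySem.List.pyGetD tiempos_llegada i 0)
                 + PySem.List.pyGetD tiempos_ejecucion i 0
      (st.1.set i.toNat (c - PySem.List.pyGetD tiempos_llegada i 0 - PySem.List.pyGetD tiempos_ejecucion i 0),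
       st.2.set i.toNat c))
    (tiempos_espera, tiempos_completados)
  st.1

-- ===== PORT B =====
-- B-side helpers: the loop bodies of Source B's stage-1 and stage-2 passes.
-- All Python index accesses in Source B are in range under Pre_ (and Source B's
-- tiempos_llegada[0] on empty input raises, outside Pre_), so List.getD is exact there.
def pvStepP (te : List Int) (st : Int × List Int) (i : Nat) : Int × List Int :=
  let s := st.1 + te.getD i 0
  (s, st.2 ++ [s])

def pvStepM (tl : List Int) (prefijos : List Int) (st : Int × List Int) (i : Nat) : Int × List Int :=
  let m := max st.1 (tl.getD i 0 - (if 0 < i then prefijos.getD (i - 1) 0 else 0))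
  (m, st.2 ++ [m])

def calcular_tiempo_espera_alt (tiempos_llegada : List Int) (tiempos_ejecucion : List Int) : List Int :=
  let n := tiempos_llegada.length
  -- Stage 1: prefix sums of execution times.
  let prefijos := ((List.range n).foldl (pvStepP tiempos_ejecucion) ((0 : Int), ([] : List Int))).2
  -- Stage 2: running maxima of arrival[i] - P[i-1].
  let maximos := ((List.range n).foldl (pvStepM tiempos_llegada prefijos)
    (tiempos_llegada.getD 0 0, ([] : List Int))).2
  -- Stage 3: closed-form waiting times.
  [0] ++ (List.range' 1 (n - 1)).map (fun i =>
    max (prefijos.getD (i - 1) 0 + maximos.getD (i - 1) 0 - tiempos_llegada.getD i 0) 0)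

-- ===== PRECONDITION & SPEC =====
-- Pre_ excludes exactly the inputs on which Python A raises IndexError: the empty process
-- list, and an execution-time list shorter than the arrival list.
def Pre_calcular_tiempo_espera (tiempos_llegada : List Int) (tiempos_ejecucion : List Int) : Prop :=
  tiempos_llegada ≠ [] ∧ tiempos_llegada.length ≤ tiempos_ejecucion.length
instance (tiempos_llegada : List Int) (tiempos_ejecucion : List Int) : Decidable (Pre_calcular_tiempo_espera tiempos_llegada tiempos_ejecucion) := by unfold Pre_calcular_tiempo_espera; infer_instance

def pvWitness_calcular_tiempo_espera : List Int × List Int := ([0, 2, 4], [3, 1, 2])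

def Spec_calcular_tiempo_espera (tiempos_llegada : List Int) (tiempos_ejecucion : List Int) (out : List Int) : Prop := out = calcular_tiempo_espera_alt tiempos_llegada tiempos_ejecucion
instance (tiempos_llegada : List Int) (tiempos_ejecucion : List Int) (out : List Int) : Decidable (Spec_calcular_tiempo_espera tiempos_llegada tiempos_ejecucion out) := by unfold Spec_calcular_tiempo_espera; infer_instance

-- ===== CLAIM (what is proved, stated in full; the proofs are below) =====
def Claim_equal_calcular_tiempo_espera : Prop := ∀ (tiempos_llegada : List Int) (tiempos_ejecucion : List Int), Dom_calcular_tiempo_espera tiempos_llegada tiempos_ejecucion → Pre_calcular_tiempo_espera tiempos_llegada tiempos_ejecucion → Spec_calcular_tiempo_espera tiempos_llegada tiempos_ejecucion (calcular_tiempo_espera tiempos_llegada tiempos_ejecucion)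

-- ===== LEMMAS AND PROOFS =====

-- Completion time of process j (0-based), as a recursive function of the index.
def pvC (tl te : List Int) : Nat → Int
  | 0 => tl.getD 0 0 + te.getD 0 0
  | j + 1 => max (pvC tl te j) (tl.getD (j + 1) 0) + te.getD (j + 1) 0

-- Waiting time of process i (for i ≥ 1).
def pvW (tl te : List Int) (i : Nat) : Int := max (pvC tl te (i - 1) - tl.getD i 0) 0

-- B's prefix sums P and running maxima M.
def pvP (te : List Int) : Nat → Int
  | 0 => te.getD 0 0
  | i + 1 => pvP te i + te.getD (i + 1) 0

def pvM (tl te : List Int) : Nat → Int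
  | 0 => tl.getD 0 0
  | i + 1 => max (pvM tl te i) (tl.getD (i + 1) 0 - pvP te i)

-- The heart of B's correctness: the prefix decomposition of the completion time.
theorem pvPM_eq_C (tl te : List Int) : ∀ i, pvP te i + pvM tl te i = pvC tl te i := by
  intro i
  induction i with
  | zero => simp [pvP, pvM, pvC]; ring
  | succ i ih =>
    show pvP te i + te.getD (i + 1) 0 + max (pvM tl te i) (tl.getD (i + 1) 0 - pvP te i)
      = max (pvC tl te i) (tl.getD (i + 1) 0) + te.getD (i + 1) 0
    omega

-- getD on a mapped range.
theorem pvGetD_map_range (f : Nat → Int) (N k : Nat) (h : k < N) :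
    ((List.range N).map f).getD k 0 = f k := by
  rw [List.getD_eq_getElem _ _ (by simpa using h)]
  simp

-- Stage 1 computes exactly the pvP values.
theorem pvPrefFold (te : List Int) : ∀ n : Nat,
    (List.range (n + 1)).foldl (pvStepP te) ((0 : Int), ([] : List Int))
    = (pvP te n, (List.range (n + 1)).map (pvP te)) := by
  intro n
  induction n with
  | zero => simp [pvStepP, pvP]
  | succ n ih =>
    rw [List.range_succ, List.foldl_append, ih]
    simp [pvStepP, pvP, List.range_succ]

-- Stage 2 computes exactly the pvM values.
theorem pvMaxFold (tl te : List Int) (N : Nat) (prefijos : List Int)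
    (hpref : prefijos = (List.range N).map (pvP te)) :
    ∀ n : Nat, n < N →
    (List.range (n + 1)).foldl (pvStepM tl prefijos) (tl.getD 0 0, ([] : List Int))
    = (pvM tl te n, (List.range (n + 1)).map (pvM tl te)) := by
  intro n
  induction n with
  | zero => intro _; simp [pvStepM, pvM]
  | succ n ih =>
    intro hn
    rw [List.range_succ, List.foldl_append, ih (by omega)]
    have hget : prefijos[n]?.getD 0 = pvP te n := by
      have h := pvGetD_map_range (pvP te) N n (by omega)
      rw [hpref]; simpa [List.getD] using h
    simp [pvStepM, pvM, List.range_succ, hget]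

-- Setting the element just past a known prefix.
theorem pvSetAppend {α : Type} (pre : List α) (x : α) (rest : List α) (v : α)
    (n : Nat) (h : n = pre.length) : (pre ++ x :: rest).set n v = pre ++ v :: rest := by
  subst h
  induction pre with
  | nil => rfl
  | cons a pre ih => simp [ih]

-- A's indexed loop, run over range(1, j+1), fills the first j waiting times and the
-- first j+1 completion times, leaving zeros beyond.
theorem pvA_fold (tl te : List Int) (hle : tl.length ≤ te.length)
    (m : Nat) (hm : tl.length = m + 1) :
    ∀ (j : Nat), j ≤ m →
    (PySem.List.pyRange 1 ((j : Int) + 1) 1).foldl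
      (fun (st : List Int × List Int) (i : Int) =>
        let c := max (PySem.List.pyGetD st.2 (i - 1) 0) (PySem.List.pyGetD tl i 0)
                   + PySem.List.pyGetD te i 0
        (st.1.set i.toNat (c - PySem.List.pyGetD tl i 0 - PySem.List.pyGetD te i 0),
         st.2.set i.toNat c))
      (List.replicate tl.length 0,
       (List.replicate tl.length 0).set 0 (PySem.List.pyGetD tl 0 0 + PySem.List.pyGetD te 0 0))
    = (0 :: ((List.range j).map (fun k => pvW tl te (k + 1)) ++ List.replicate (m - j) 0),
       (List.range (j + 1)).map (pvC tl te) ++ List.replicate (m - j) 0) := by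
  intro j
  induction j with
  | zero =>
    intro _
    rw [PySem.List.pyRange_one_eq_nil (by norm_num)]
    rw [hm]
    simp [List.replicate_succ, pvC, PySem.List.pyGetD_zero]
  | succ j ih =>
    intro hj
    have hsplit : PySem.List.pyRange 1 (((j + 1 : Nat) : Int) + 1) 1
        = PySem.List.pyRange 1 ((j : Int) + 1) 1 ++ [(j : Int) + 1] := by
      have h1 : (((j + 1 : Nat) : Int) + 1) = ((j : Int) + 1) + 1 := by push_cast; ring
      rw [h1, PySem.List.pyRange_one_succ_right (by omega)]
    rw [hsplit, List.foldl_append, ih (by omega)]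
    simp only [List.foldl_cons, List.foldl_nil]
    have hjtl : j + 1 < tl.length := by omega
    have hjte : j + 1 < te.length := by omega
    have hi1 : (j : Int) + 1 - 1 = ((j : Nat) : Int) := by ring
    have hi2 : (j : Int) + 1 = (((j + 1 : Nat)) : Int) := by push_cast; ring
    have hi3 : ((j : Int) + 1).toNat = j + 1 := by omega
    have hget2 : PySem.List.pyGetD ((List.range (j + 1)).map (pvC tl te) ++ List.replicate (m - j) 0) ((j : Int) + 1 - 1) 0 = pvC tl te j := by
      rw [hi1, PySem.List.pyGetD_natCast]
      rw [List.getD_eq_getElem _ 0 (by simp; omega)]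
      rw [List.getElem_append_left (by simp)]
      simp
    have hgettl : PySem.List.pyGetD tl ((j : Int) + 1) 0 = tl.getD (j + 1) 0 := by
      rw [hi2, PySem.List.pyGetD_natCast]
    have hgette : PySem.List.pyGetD te ((j : Int) + 1) 0 = te.getD (j + 1) 0 := by
      rw [hi2, PySem.List.pyGetD_natCast]
    simp only [hget2, hgettl, hgette, hi3]
    have hrep : List.replicate (m - j) (0 : Int) = 0 :: List.replicate (m - (j + 1)) 0 := by
      have h : m - j = (m - (j + 1)) + 1 := by omega
      rw [h, List.replicate_succ]
    rw [hrep]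
    rw [List.set_cons_succ]
    rw [pvSetAppend _ _ _ _ j (by simp)]
    rw [pvSetAppend _ _ _ _ (j + 1) (by simp)]
    have hw : max (pvC tl te j) (tl.getD (j + 1) 0) + te.getD (j + 1) 0
        - tl.getD (j + 1) 0 - te.getD (j + 1) 0 = pvW tl te (j + 1) := by
      show _ = max (pvC tl te ((j + 1) - 1) - tl.getD (j + 1) 0) 0
      norm_num
      omega
    have hc : max (pvC tl te j) (tl.getD (j + 1) 0) + te.getD (j + 1) 0 = pvC tl te (j + 1) := rfl
    rw [hw, hc]
    simp [List.range_succ]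

-- B's three staged passes produce exactly the waiting times pvW 1, …, pvW (n-1).
theorem pvB_char (tl te : List Int) (m : Nat) (hm : tl.length = m + 1) :
    calcular_tiempo_espera_alt tl te
    = 0 :: (List.range m).map (fun k => pvW tl te (k + 1)) := by
  simp only [calcular_tiempo_espera_alt, hm]
  rw [pvPrefFold te m]
  rw [pvMaxFold tl te (m + 1) _ rfl m (by omega)]
  have hrange : List.range' 1 (m + 1 - 1) = (List.range m).map (fun k => 1 + k) := by
    simp [List.range'_eq_map_range]
  rw [hrange, List.map_map]
  simp only [List.singleton_append, List.cons.injEq, true_and]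
  apply List.map_congr_left
  intro k hk
  simp only [List.mem_range] at hk
  simp only [Function.comp_def]
  have h1 : 1 + k - 1 = k := by omega
  rw [h1, pvGetD_map_range _ _ _ (by omega), pvGetD_map_range _ _ _ (by omega)]
  show max (pvP te k + pvM tl te k - tl.getD (1 + k) 0) 0
    = max (pvC tl te ((k + 1) - 1) - tl.getD (k + 1) 0) 0
  rw [pvPM_eq_C]
  norm_num
  rw [Nat.add_comm 1 k]

-- ===== VERDICT (by name: the statement is the Claim_ definition above) =====
theorem calcular_tiempo_espera_spec : Claim_equal_calcular_tiempo_espera := by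
  intro tl te _ hpre
  obtain ⟨hne, hle⟩ := hpre
  unfold Spec_calcular_tiempo_espera
  match tl, te with
  | [], _ => exact absurd rfl hne
  | l0 :: ls, [] => simp at hle
  | l0 :: ls, e0 :: es =>
    simp only [List.length_cons] at hle
    have hA : calcular_tiempo_espera (l0 :: ls) (e0 :: es)
        = 0 :: (List.range ls.length).map (fun k => pvW (l0 :: ls) (e0 :: es) (k + 1)) := by
      simp only [calcular_tiempo_espera]
      have hn : (((l0 :: ls).length : Nat) : Int) = ((ls.length : Nat) : Int) + 1 := by
        simp
      rw [hn]
      rw [pvA_fold (l0 :: ls) (e0 :: es) (by simpa using hle) ls.length (by simp) ls.length (le_refl _)]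
      simp
    rw [hA, pvB_char (l0 :: ls) (e0 :: es) ls.length (by simp)]
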